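-- pv_equiv track=rewrite | github.com/Ma-urj/Hello-World | sudoku.py | BlockCheck
-- ===== SOURCE A (Python) =====
-- def Parameter(column,row):
--     if column >= 0 and column < 3:
--         if row >= 0 and row < 3:
--             return [[0,3],[0,3]]
--         elif row >= 3 and row < 6:
--             return [[0,3],[3,6]]
--         elif row >= 6 and row < 9:
--             return [[0,3],[6,9]]
--     elif column >= 3 and column < 6:
--         if row >= 0 and row < 3:
--             return [[3,6],[0,3]]
--         elif row >= 3 and row < 6:
--             return [[3,6],[3,6]]
--         elif row >= 6 and row < 9:
--             return [[3,6],[6,9]]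
--     elif column >= 6 and column < 9:
--         if row >= 0 and row < 3:
--             return [[6,9],[0,3]]
--         elif row >= 3 and row < 6:
--             return [[6,9],[3,6]]
--         elif row >= 6 and row < 9:
--             return [[6,9],[6,9]]
--
-- def BlockCheck(set,column,row,blocked):
--     param = Parameter(column,row)
--     columnparam = param[0]
--     rowparam = param[1]
--     for k in range(1,10):
--         for i in range(rowparam[0],rowparam[1]):
--             for j in range(columnparam[0],columnparam[1]):
--                 if k not in blocked and k==set[i][j]:
--                     blocked.append(k)
--     return blocked
-- ===== SOURCE B (Python) =====
-- def BlockCheck(set, column, row, blocked):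
--     clo = 3 * (column // 3)
--     rlo = 3 * (row // 3)
--     present = {set[i][j] for i in range(rlo, rlo + 3) for j in range(clo, clo + 3)}
--     for k in range(1, 10):
--         if k in present and k not in blocked:
--             blocked.append(k)
--     return blocked
-- ===== Notes on version B (the rewrite author's own statement) =====
-- stated objective: simpler
-- what changed: B replaces the 27-step triple-nested repeated block scan (and the Parameter lookup table) with block bounds computed arithmetically via //3, one pass collecting the block's cells into a set, and a single ascending loop over 1..9 appending digits present in the set and not already in blocked.
import Mathlib
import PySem

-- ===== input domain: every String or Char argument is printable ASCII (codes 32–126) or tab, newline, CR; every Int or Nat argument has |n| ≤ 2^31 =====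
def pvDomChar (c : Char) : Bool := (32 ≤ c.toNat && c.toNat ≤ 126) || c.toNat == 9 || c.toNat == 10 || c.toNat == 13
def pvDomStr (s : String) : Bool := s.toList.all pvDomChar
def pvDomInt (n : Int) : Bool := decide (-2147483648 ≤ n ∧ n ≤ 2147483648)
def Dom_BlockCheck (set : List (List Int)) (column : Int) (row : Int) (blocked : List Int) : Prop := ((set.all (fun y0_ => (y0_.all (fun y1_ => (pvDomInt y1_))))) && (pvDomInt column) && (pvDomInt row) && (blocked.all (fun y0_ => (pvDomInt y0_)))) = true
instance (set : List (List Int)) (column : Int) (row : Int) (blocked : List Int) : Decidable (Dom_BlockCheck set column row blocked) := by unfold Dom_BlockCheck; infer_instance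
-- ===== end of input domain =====

-- B replaces A's Parameter lookup table and triple-nested repeated block scan with //3
-- arithmetic, one pass collecting the block's 9 cells into a set, and a single ascending
-- 1..9 loop; objective: simpler. Python A and B both mutate `blocked` in place (append);
-- the equivalence proved here is about the return value.

-- ===== PORT A =====
def ParameterA (column row : Int) : Option (List (List Int)) :=
  if column ≥ 0 ∧ column < 3 then
    (if row ≥ 0 ∧ row < 3 then some [[0,3],[0,3]]
     else if row ≥ 3 ∧ row < 6 then some [[0,3],[3,6]]
     else if row ≥ 6 ∧ row < 9 then some [[0,3],[6,9]]
     else none)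
  else if column ≥ 3 ∧ column < 6 then
    (if row ≥ 0 ∧ row < 3 then some [[3,6],[0,3]]
     else if row ≥ 3 ∧ row < 6 then some [[3,6],[3,6]]
     else if row ≥ 6 ∧ row < 9 then some [[3,6],[6,9]]
     else none)
  else if column ≥ 6 ∧ column < 9 then
    (if row ≥ 0 ∧ row < 3 then some [[6,9],[0,3]]
     else if row ≥ 3 ∧ row < 6 then some [[6,9],[3,6]]
     else if row ≥ 6 ∧ row < 9 then some [[6,9],[6,9]]
     else none)
  else none

-- Where Python raises (Parameter returns None, or set[i][j] out of range) the port's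
-- value is a dummy ([] / pyGetD defaults); those inputs are excluded by Pre_BlockCheck.
def BlockCheck (set : List (List Int)) (column : Int) (row : Int) (blocked : List Int) : List Int :=
  match ParameterA column row with
  | none => []
  | some param =>
    let columnparam := PySem.List.pyGetD param 0 []
    let rowparam := PySem.List.pyGetD param 1 []
    (PySem.List.pyRange 1 10 1).foldl (fun blocked k =>
      (PySem.List.pyRange (PySem.List.pyGetD rowparam 0 0) (PySem.List.pyGetD rowparam 1 0) 1).foldl (fun blocked i =>
        (PySem.List.pyRange (PySem.List.pyGetD columnparam 0 0) (PySem.List.pyGetD columnparam 1 0) 1).foldl (fun blocked j =>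
          if ¬ blocked.contains k ∧ k = PySem.List.pyGetD (PySem.List.pyGetD set i []) j 0
          then blocked ++ [k] else blocked) blocked) blocked) blocked

-- ===== PORT B =====
def BlockCheck_alt (set : List (List Int)) (column : Int) (row : Int) (blocked : List Int) : List Int :=
  let clo := 3 * PySem.Int.floordiv column 3
  let rlo := 3 * PySem.Int.floordiv row 3
  let present : PySem.Set Int := PySem.Set.ofList
    ((PySem.List.pyRange rlo (rlo + 3) 1).flatMap (fun i =>
      (PySem.List.pyRange clo (clo + 3) 1).map (fun j =>
        PySem.List.pyGetD (PySem.List.pyGetD set i []) j 0)))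
  (PySem.List.pyRange 1 10 1).foldl (fun blocked k =>
    if present.contains k ∧ ¬ blocked.contains k then blocked ++ [k] else blocked) blocked

-- ===== PRECONDITION & SPEC =====
-- Pre_ excludes exactly the inputs where Python A raises: column/row outside 0..8
-- (Parameter returns None → TypeError) and grids too small for the selected block
-- (set[i][j] → IndexError).
def Pre_BlockCheck (set : List (List Int)) (column : Int) (row : Int) (blocked : List Int) : Prop :=
  0 ≤ column ∧ column < 9 ∧ 0 ≤ row ∧ row < 9 ∧
  3 * PySem.Int.floordiv row 3 + 3 ≤ (set.length : Int) ∧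
  ∀ r ∈ (set.drop (3 * PySem.Int.floordiv row 3).toNat).take 3,
    3 * PySem.Int.floordiv column 3 + 3 ≤ (r.length : Int)
instance (set : List (List Int)) (column : Int) (row : Int) (blocked : List Int) : Decidable (Pre_BlockCheck set column row blocked) := by unfold Pre_BlockCheck; infer_instance

def pvWitness_BlockCheck : List (List Int) × Int × Int × List Int :=
  ([[1,2,3],[4,5,6],[7,8,9]], 0, 0, [2])

def Spec_BlockCheck (set : List (List Int)) (column : Int) (row : Int) (blocked : List Int) (out : List Int) : Prop := out = BlockCheck_alt set column row blocked
instance (set : List (List Int)) (column : Int) (row : Int) (blocked : List Int) (out : List Int) : Decidable (Spec_BlockCheck set column row blocked out) := by unfold Spec_BlockCheck; infer_instance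

-- ===== CLAIM (what is proved, stated in full; the proofs are below) =====
def Claim_equal_BlockCheck : Prop := ∀ (set : List (List Int)) (column : Int) (row : Int) (blocked : List Int), Dom_BlockCheck set column row blocked → Pre_BlockCheck set column row blocked → Spec_BlockCheck set column row blocked (BlockCheck set column row blocked)

-- ===== LEMMAS AND PROOFS =====

-- Under 0 ≤ column,row < 9 the lookup table is exactly the //3-arithmetic bounds.
theorem paramA_eq (column row : Int) (hc0 : 0 ≤ column) (hc9 : column < 9)
    (hr0 : 0 ≤ row) (hr9 : row < 9) :
    ParameterA column row =
      some [[3 * PySem.Int.floordiv column 3, 3 * PySem.Int.floordiv column 3 + 3],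
            [3 * PySem.Int.floordiv row 3, 3 * PySem.Int.floordiv row 3 + 3]] := by
  interval_cases column <;> interval_cases row <;> decide

-- One k-pass over a list of cells: it appends k once iff k is among the cells
-- and not yet in blocked.
theorem foldl_cells (k : Int) (cells b : List Int) :
    cells.foldl (fun b c => if ¬ b.contains k ∧ k = c then b ++ [k] else b) b
      = if ¬ b.contains k ∧ cells.contains k then b ++ [k] else b := by
  induction cells generalizing b with
  | nil => simp
  | cons c cs ih =>
    rw [List.foldl_cons]
    by_cases hb : b.contains k
    · rw [if_neg (fun h => h.1 hb), ih]
      have hm : k ∈ b := by simpa using hb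
      simp [hm]
    · have hm : k ∉ b := by simpa using hb
      by_cases hc : k = c
      · subst hc
        rw [if_pos ⟨hb, rfl⟩, ih]
        simp [hm]
      · rw [if_neg (fun h => hc h.2), ih]
        simp [hc]

-- A's double loop for one k over the block = one pass over the flattened cell list.
theorem double_loop (cell : Int → Int → Int) (k : Int) (outer inner : List Int)
    (b : List Int) :
    outer.foldl (fun b i => inner.foldl
        (fun b j => if ¬ b.contains k ∧ k = cell i j then b ++ [k] else b) b) b
      = if ¬ b.contains k ∧ (outer.flatMap (fun i => inner.map (cell i))).contains k
        then b ++ [k] else b := by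
  induction outer generalizing b with
  | nil => simp
  | cons o os ih =>
    have hm : List.foldl
          (fun b j => if ¬ b.contains k ∧ k = cell o j then b ++ [k] else b) b inner
        = List.foldl (fun b c => if ¬ b.contains k ∧ k = c then b ++ [k] else b) b
            (inner.map (cell o)) := by
      rw [List.foldl_map]
    rw [List.foldl_cons, hm, foldl_cells, ih]
    by_cases h1 : k ∈ b <;> by_cases h2 : k ∈ inner.map (cell o) <;>
      simp [h1, h2, List.flatMap_cons]

-- Literal-index projections of the two-element parameter lists.
theorem pyGetD_pair0 (x y : List Int) : PySem.List.pyGetD [x,y] 0 [] = x := rfl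
theorem pyGetD_pair1 (x y : List Int) : PySem.List.pyGetD [x,y] 1 [] = y := rfl
theorem pyGetD_int0 (a b : Int) : PySem.List.pyGetD [a,b] 0 0 = a := rfl
theorem pyGetD_int1 (a b : Int) : PySem.List.pyGetD [a,b] 1 0 = b := rfl

-- ===== VERDICT (by name: the statement is the Claim_ definition above) =====
theorem BlockCheck_spec : Claim_equal_BlockCheck := by
  intro set column row blocked _ hpre
  obtain ⟨hc0, hc9, hr0, hr9, _, _⟩ := hpre
  show BlockCheck set column row blocked = BlockCheck_alt set column row blocked
  unfold BlockCheck BlockCheck_alt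
  rw [paramA_eq column row hc0 hc9 hr0 hr9]
  simp only [pyGetD_pair0, pyGetD_pair1, pyGetD_int0, pyGetD_int1]
  show (PySem.List.pyRange 1 10 1).foldl _ blocked = (PySem.List.pyRange 1 10 1).foldl _ blocked
  apply PySem.List.foldl_congr_mem
  intro b k _
  rw [double_loop (fun i j => PySem.List.pyGetD (PySem.List.pyGetD set i []) j 0) k]
  refine if_congr ?_ rfl rfl
  constructor
  · rintro ⟨hb, hcl⟩
    exact ⟨by simpa [PySem.Set.mem_ofList] using hcl, hb⟩
  · rintro ⟨hcl, hb⟩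
    exact ⟨hb, by simpa [PySem.Set.mem_ofList] using hcl⟩
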